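-- pv_equiv track=rewrite | github.com/LMRaihan/Graph-ANimated | thesiswork/thesiswork/ddtarts_2/preproces_mod/preprocess.py | specialWord
-- ===== SOURCE A (Python) =====
-- def specialWord(text):
--     t_list = text.split('\n')
--     special_words = ["deprecate", "sq", "sonarqube", "smell", "readable", "simpl", "annotat"]
--     wording = ""
--     for line in t_list:
--         words_in_line = line.split(" ")
--         for word in words_in_line:
--             for keyw in special_words:
--                 if keyw in word.lower():
--                     wording = "for " + word.lower()
--                     break
--     return wording
-- ===== SOURCE B (Python) =====
-- def specialWord(text):
--     special_words = ["deprecate", "sq", "sonarqube", "smell", "readable", "simpl", "annotat"]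
--     for line in reversed(text.split('\n')):
--         for word in reversed(line.split(' ')):
--             if any(k in word.lower() for k in special_words):
--                 return "for " + word.lower()
--     return ""
-- ===== Notes on version B (the rewrite author's own statement) =====
-- stated objective: alternative
-- what changed: B scans the words in reverse global order (reversed lines, reversed words per line) and returns on the first keyword match, instead of A's forward scan that keeps overwriting an accumulator with the latest match.
import Mathlib
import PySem

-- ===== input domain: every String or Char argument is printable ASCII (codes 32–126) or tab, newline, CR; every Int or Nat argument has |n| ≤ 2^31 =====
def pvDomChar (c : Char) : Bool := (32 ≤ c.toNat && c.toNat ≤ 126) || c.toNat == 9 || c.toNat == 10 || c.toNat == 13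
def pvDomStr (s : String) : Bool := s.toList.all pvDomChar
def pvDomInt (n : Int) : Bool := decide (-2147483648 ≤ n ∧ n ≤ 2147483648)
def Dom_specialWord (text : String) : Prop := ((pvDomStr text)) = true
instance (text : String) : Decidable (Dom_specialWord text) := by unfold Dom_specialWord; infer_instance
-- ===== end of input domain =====

-- B replaces A's forward scan with an overwritten accumulator by a reverse-order early-exit search (alternative decomposition, same result).

-- ===== PORT A =====
def swSpecialWords : List (List Char) :=
  ["deprecate".toList, "sq".toList, "sonarqube".toList, "smell".toList,
   "readable".toList, "simpl".toList, "annotat".toList]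

-- inner 'for keyw in special_words: if keyw in word.lower(): wording = …; break'
def swKwLoop (word : List Char) : List (List Char) → List Char → List Char
  | [], wording => wording
  | k :: ks, wording =>
      if PySem.Chars.isIn k (PySem.Chars.lower word) then
        "for ".toList ++ PySem.Chars.lower word
      else swKwLoop word ks wording

def specialWord (text : String) : String :=
  String.ofList ((PySem.Chars.splitOn text.toList ['\n']).foldl
    (fun wording line =>
      (PySem.Chars.splitOn line [' ']).foldl
        (fun wording word => swKwLoop word swSpecialWords wording) wording) [])

-- ===== PORT B =====
-- 'any(k in word.lower() for k in special_words)'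
def swHit (word : List Char) : Bool :=
  swSpecialWords.any (fun k => PySem.Chars.isIn k (PySem.Chars.lower word))

-- inner 'for word in reversed(line.split(' ')): if any(...): return …'
def swWordSearch : List (List Char) → Option (List Char)
  | [] => none
  | w :: ws =>
      if swHit w then some ("for ".toList ++ PySem.Chars.lower w)
      else swWordSearch ws

-- outer 'for line in reversed(text.split('\n')): …'
def swLineSearch : List (List Char) → Option (List Char)
  | [] => none
  | line :: rest =>
      match swWordSearch (PySem.Chars.splitOn line [' ']).reverse with
      | some r => some r
      | none => swLineSearch rest

def specialWord_alt (text : String) : String :=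
  String.ofList ((swLineSearch (PySem.Chars.splitOn text.toList ['\n']).reverse).getD [])

-- ===== PRECONDITION & SPEC =====
def Spec_specialWord (text : String) (out : String) : Prop := out = specialWord_alt text
instance (text : String) (out : String) : Decidable (Spec_specialWord text out) := by unfold Spec_specialWord; infer_instance

-- ===== CLAIM (what is proved, stated in full; the proofs are below) =====
def Claim_equal_specialWord : Prop := ∀ (text : String), Dom_specialWord text → Spec_specialWord text (specialWord text)

-- ===== LEMMAS AND PROOFS =====
lemma swKwLoop_eq (w : List Char) (ks : List (List Char)) (acc : List Char) :
    swKwLoop w ks acc =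
      if ks.any (fun k => PySem.Chars.isIn k (PySem.Chars.lower w)) then
        "for ".toList ++ PySem.Chars.lower w
      else acc := by
  induction ks with
  | nil => simp [swKwLoop]
  | cons k ks ih =>
      by_cases h : PySem.Chars.isIn k (PySem.Chars.lower w)
      · simp [swKwLoop, h]
      · simp [swKwLoop, h, ih]

lemma swWordSearch_append (l₁ l₂ : List (List Char)) :
    swWordSearch (l₁ ++ l₂) = (swWordSearch l₁).or (swWordSearch l₂) := by
  induction l₁ with
  | nil => simp [swWordSearch]
  | cons w ws ih =>
      by_cases h : swHit w
      · simp [swWordSearch, h]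
      · simp [swWordSearch, h, ih]

lemma swWord_eq (ws : List (List Char)) (acc : List Char) :
    ws.foldl (fun a w => swKwLoop w swSpecialWords a) acc
      = (swWordSearch ws.reverse).getD acc := by
  induction ws generalizing acc with
  | nil => simp [swWordSearch]
  | cons w ws ih =>
      rw [List.foldl_cons, ih, List.reverse_cons, swWordSearch_append]
      cases h : swWordSearch ws.reverse with
      | some r => simp
      | none =>
          simp only [Option.getD_none, Option.none_or, swWordSearch, swHit, swKwLoop_eq]
          split_ifs <;> simp

lemma swLineSearch_append (l₁ l₂ : List (List Char)) :
    swLineSearch (l₁ ++ l₂) = (swLineSearch l₁).or (swLineSearch l₂) := by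
  induction l₁ with
  | nil => simp [swLineSearch]
  | cons line rest ih =>
      cases h : swWordSearch (PySem.Chars.splitOn line [' ']).reverse with
      | some r => simp [swLineSearch, h]
      | none => simp [swLineSearch, h, ih]

lemma swLine_eq (ls : List (List Char)) (acc : List Char) :
    ls.foldl (fun a line =>
        (PySem.Chars.splitOn line [' ']).foldl
          (fun a w => swKwLoop w swSpecialWords a) a) acc
      = (swLineSearch ls.reverse).getD acc := by
  induction ls generalizing acc with
  | nil => simp [swLineSearch]
  | cons line rest ih =>
      rw [List.foldl_cons, ih, List.reverse_cons, swLineSearch_append]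
      cases h : swLineSearch rest.reverse with
      | some r => simp
      | none =>
          simp only [Option.getD_none, Option.none_or]
          rw [swWord_eq]
          cases hw : swWordSearch (PySem.Chars.splitOn line [' ']).reverse with
          | some r => simp [swLineSearch, hw]
          | none => simp [swLineSearch, hw]

-- ===== VERDICT (by name: the statement is the Claim_ definition above) =====
theorem specialWord_spec : Claim_equal_specialWord := by
  intro text _
  unfold Spec_specialWord specialWord specialWord_alt
  rw [swLine_eq]
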